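-- pv_equiv track=rewrite | github.com/FTY5050/play_in_fool | mono.py | PyDay
-- ===== SOURCE A (Python) =====
-- def PyDay(Array):
-- 	money = 0
-- 	for i in Array:
-- 		if i == "1":
-- 			money+=100
-- 		elif i == "2":
-- 			money+=300
-- 		elif i == "3":
-- 			money+=500
-- 		elif i == "4":
-- 			money+=1000
-- 		elif i == "5":
-- 			money+=5000
-- 		elif i == "6":
-- 			money+=7000
-- 	return money
-- ===== SOURCE B (Python) =====
-- PRICES = (("1", 100), ("2", 300), ("3", 500), ("4", 1000), ("5", 5000), ("6", 7000))
--
-- def PyDay(Array):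
--     total = 0
--     for code, value in PRICES:
--         total += value * Array.count(code)
--     return total
-- ===== Notes on version B (the rewrite author's own statement) =====
-- stated objective: alternative
-- what changed: B loops over the fixed six-entry price table and for each code multiplies its value by Array.count(code), i.e. six counting passes over the input instead of A's single branching if/elif scan; no dictionary, no per-element dispatch.
import Mathlib
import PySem

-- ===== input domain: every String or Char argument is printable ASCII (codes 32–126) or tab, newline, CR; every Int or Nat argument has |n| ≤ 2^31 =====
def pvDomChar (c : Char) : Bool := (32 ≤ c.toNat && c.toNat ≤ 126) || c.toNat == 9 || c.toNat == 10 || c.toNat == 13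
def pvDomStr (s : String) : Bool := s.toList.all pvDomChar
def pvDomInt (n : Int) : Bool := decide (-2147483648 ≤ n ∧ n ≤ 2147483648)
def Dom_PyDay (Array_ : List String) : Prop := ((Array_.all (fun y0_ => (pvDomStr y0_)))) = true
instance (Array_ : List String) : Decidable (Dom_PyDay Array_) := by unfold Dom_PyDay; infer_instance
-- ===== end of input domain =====

-- B iterates over the fixed six-entry price table, counting each code's occurrences in the
-- input (six counting passes), instead of A's single per-element if/elif accumulation.

-- ===== PORT A =====
def PyDay (Array_ : List String) : Int :=
  Array_.foldl (fun money i =>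
    if i = "1" then money + 100
    else if i = "2" then money + 300
    else if i = "3" then money + 500
    else if i = "4" then money + 1000
    else if i = "5" then money + 5000
    else if i = "6" then money + 7000
    else money) 0

-- ===== PORT B =====
def pvPrices : List (String × Int) :=
  [("1", 100), ("2", 300), ("3", 500), ("4", 1000), ("5", 5000), ("6", 7000)]

def PyDay_alt (Array_ : List String) : Int :=
  pvPrices.foldl (fun total p => total + p.2 * (PySem.List.count Array_ p.1 : Int)) 0

-- ===== PRECONDITION & SPEC =====
def Spec_PyDay (Array_ : List String) (out : Int) : Prop := out = PyDay_alt Array_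
instance (Array_ : List String) (out : Int) : Decidable (Spec_PyDay Array_ out) := by unfold Spec_PyDay; infer_instance

-- ===== CLAIM =====
def Claim_equal_PyDay : Prop := ∀ (Array_ : List String), Dom_PyDay Array_ → Spec_PyDay Array_ (PyDay Array_)

-- ===== LEMMAS AND PROOFS =====
-- A's loop computes m + 100·#"1" + 300·#"2" + … for any starting accumulator m.
set_option maxHeartbeats 1000000 in
theorem PyDay_aux (xs : List String) (m : Int) :
    xs.foldl (fun money i =>
      if i = "1" then money + 100
      else if i = "2" then money + 300
      else if i = "3" then money + 500
      else if i = "4" then money + 1000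
      else if i = "5" then money + 5000
      else if i = "6" then money + 7000
      else money) m
    = m + 100 * (xs.count "1" : Int) + 300 * (xs.count "2" : Int)
        + 500 * (xs.count "3" : Int) + 1000 * (xs.count "4" : Int)
        + 5000 * (xs.count "5" : Int) + 7000 * (xs.count "6" : Int) := by
  induction xs generalizing m with
  | nil => simp
  | cons x xs ih =>
    rw [List.foldl_cons, ih]
    simp only [List.count_cons, beq_iff_eq]
    by_cases h1 : x = "1"
    · subst h1; norm_num; ring
    by_cases h2 : x = "2"
    · subst h2; norm_num; push_cast; ring
    by_cases h3 : x = "3"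
    · subst h3; norm_num; push_cast; ring
    by_cases h4 : x = "4"
    · subst h4; norm_num; push_cast; ring
    by_cases h5 : x = "5"
    · subst h5; norm_num; push_cast; ring
    by_cases h6 : x = "6"
    · subst h6; norm_num; push_cast; ring
    rw [if_neg h1, if_neg h2, if_neg h3, if_neg h4, if_neg h5, if_neg h6]
    push_cast
    simp only [if_neg h1, if_neg h2, if_neg h3, if_neg h4, if_neg h5, if_neg h6]
    ring

-- ===== VERDICT =====
theorem PyDay_spec : Claim_equal_PyDay := by
  intro xs _
  show PyDay xs = PyDay_alt xs
  simp only [PyDay_alt, pvPrices, List.foldl, PySem.List.count_eq]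
  rw [PyDay, PyDay_aux]
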